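-- pv_equiv track=rewrite | github.com/Kiskecsi325/Algoritmusok | activities/activities.py | count_non_overlapping_subsets
-- ===== SOURCE A (Python) =====
-- MODULO = 10 ** 8  # To compute the result modulo 10^8
--
-- def count_non_overlapping_subsets(classes):
--     classes.sort(key=lambda x: (x[1], x[0]))
--
--     n = len(classes)
--     dp = [0] * (n + 1)
--     dp[0] = 1
--
--     latest_non_overlapping = [-1] * n
--     for i in range(n):
--         low, high = 0, i - 1
--         while low <= high:
--             mid = (low + high) // 2
--             if classes[mid][1] <= classes[i][0]:
--                 latest_non_overlapping[i] = mid
--                 low = mid + 1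
--             else:
--                 high = mid - 1
--
--     for i in range(1, n + 1):
--         exclude = dp[i - 1]
--         include = dp[latest_non_overlapping[i - 1] + 1] if latest_non_overlapping[i - 1] != -1 else 1
--         dp[i] = (exclude + include) % MODULO
--
--     return (dp[n] - 1) % MODULO
-- ===== SOURCE B (Python) =====
-- MODULO = 10 ** 8  # To compute the result modulo 10^8
--
--
-- def count_non_overlapping_subsets(classes):
--     classes.sort(key=lambda x: (x[1], x[0]))
--
--     # f[i] = number of non-overlapping subsets whose member with the largest
--     # (end, start) key is classes[i]; every counted subset has exactly one such
--     # member, so the answer is simply sum(f) mod MODULO.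
--     f = []
--     for start, _end in classes:
--         c = 1
--         for (_s2, e2), fj in zip(classes, f):
--             if e2 <= start:
--                 c += fj
--         f.append(c % MODULO)
--
--     return sum(f) % MODULO
-- ===== Notes on version B (the rewrite author's own statement) =====
-- stated objective: simpler
-- what changed: Replaced the include/exclude prefix DP over dp[0..n] with precomputed binary searches by a direct last-element count: after the same in-place sort, f[i] = 1 + sum of f[j] over earlier compatible intervals found by a plain scan (no binary search, no latest array, no dp offsets), and the answer is sum(f) % MODULO with no final minus-one.
import Mathlib
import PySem

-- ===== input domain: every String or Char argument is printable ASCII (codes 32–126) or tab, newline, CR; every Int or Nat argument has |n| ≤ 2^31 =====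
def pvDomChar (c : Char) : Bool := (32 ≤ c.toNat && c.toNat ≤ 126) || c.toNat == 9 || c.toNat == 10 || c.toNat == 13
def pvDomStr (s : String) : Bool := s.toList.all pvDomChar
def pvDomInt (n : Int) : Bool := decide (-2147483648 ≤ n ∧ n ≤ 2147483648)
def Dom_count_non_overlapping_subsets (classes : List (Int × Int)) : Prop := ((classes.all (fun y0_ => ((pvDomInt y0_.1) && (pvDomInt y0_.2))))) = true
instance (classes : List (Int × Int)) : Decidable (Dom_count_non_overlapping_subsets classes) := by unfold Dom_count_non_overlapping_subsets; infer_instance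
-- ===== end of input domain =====

-- B drops A's binary searches and include/exclude dp array entirely: after the same in-place
-- sort it counts, by a plain quadratic scan, f[i] = 1 + sum of f[j] over earlier compatible
-- intervals and returns sum(f) % MODULO (objective: simpler; O(n^2) vs A's O(n log n)).
-- A sorts its argument in place; B performs the same in-place sort, and the equivalence
-- proved here is about the return value.

def MODULO : Int := 10 ^ 8  -- To compute the result modulo 10^8

-- ===== PORT A =====
-- the inner `while low <= high` binary-search loop of A (acc = latest_non_overlapping[i],
-- updated to mid when classes[mid][1] <= classes[i][0]); index mid is always in range in A,
-- so pyGetD's default is never used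
lemma pvSearchA_dec1 {low high : Int} (h : low ≤ high) :
    (high + 1 - (PySem.Int.floordiv (low + high) 2 + 1)).toNat < (high + 1 - low).toNat := by
  have := PySem.Int.floordiv_two_mid_bounds h; omega

lemma pvSearchA_dec2 {low high : Int} (h : low ≤ high) :
    (PySem.Int.floordiv (low + high) 2 - 1 + 1 - low).toNat < (high + 1 - low).toNat := by
  have := PySem.Int.floordiv_two_mid_bounds h; omega

def pvSearchA (cs : List (Int × Int)) (s low high acc : Int) : Int :=
  if h : low ≤ high then
    let mid := PySem.Int.floordiv (low + high) 2
    if (PySem.List.pyGetD cs mid (0, 0)).2 ≤ s then pvSearchA cs s (mid + 1) high mid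
    else pvSearchA cs s low (mid - 1) acc
  else acc
termination_by (high + 1 - low).toNat
decreasing_by
  · exact pvSearchA_dec1 h
  · exact pvSearchA_dec2 h

-- Python's key `lambda x: (x[1], x[0])` is a tuple key: PySem.List.sorted2 with k1 = end, k2 = start
def count_non_overlapping_subsets (classes : List (Int × Int)) : Int :=
  let cs := PySem.List.sorted2 classes (fun x => x.2) (fun x => x.1)
  let n := PySem.List.len cs
  -- latest_non_overlapping: entry i is the result of the binary-search while-loop, started at -1
  let latest := (PySem.List.pyRange 0 n 1).map (fun i =>
    pvSearchA cs (PySem.List.pyGetD cs i (0, 0)).1 0 (i - 1) (-1))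
  -- dp[0] = 1; for i in range(1, n+1): dp[i] = (exclude + include) % MODULO, filled left to right
  let dp := (PySem.List.pyRange 1 (n + 1) 1).foldl (fun dp i =>
    let exclude := PySem.List.pyGetD dp (i - 1) 0
    let li := PySem.List.pyGetD latest (i - 1) 0
    let include_ := if li ≠ -1 then PySem.List.pyGetD dp (li + 1) 0 else 1
    dp ++ [PySem.Int.mod (exclude + include_) MODULO]) [1]
  PySem.Int.mod (PySem.List.pyGetD dp n 0 - 1) MODULO

-- ===== PORT B =====
-- Source B: after the same in-place sort, one quadratic pass building the list f
-- (`for start, _end in classes: c = 1; for (_s2, e2), fj in zip(classes, f): if e2 <= start: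
-- c += fj; f.append(c % MODULO)`), then `return sum(f) % MODULO`
def count_non_overlapping_subsets_alt (classes : List (Int × Int)) : Int :=
  let cs := PySem.List.sorted2 classes (fun x => x.2) (fun x => x.1)
  let f := cs.foldl (fun f se =>
    let c := (cs.zip f).foldl (fun c p => if p.1.2 ≤ se.1 then c + p.2 else c) 1
    f ++ [PySem.Int.mod c MODULO]) []
  PySem.Int.mod (f.foldl (· + ·) 0) MODULO

-- ===== PRECONDITION & SPEC =====
def Spec_count_non_overlapping_subsets (classes : List (Int × Int)) (out : Int) : Prop := out = count_non_overlapping_subsets_alt classes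
instance (classes : List (Int × Int)) (out : Int) : Decidable (Spec_count_non_overlapping_subsets classes out) := by unfold Spec_count_non_overlapping_subsets; infer_instance

-- ===== CLAIM (what is proved, stated in full; the proofs are below) =====
def Claim_equal_count_non_overlapping_subsets : Prop := ∀ (classes : List (Int × Int)), Dom_count_non_overlapping_subsets classes → Spec_count_non_overlapping_subsets classes (count_non_overlapping_subsets classes)

-- ===== LEMMAS AND PROOFS =====

-- sorted2 with keys (end, start) is sorted with the lexicographic key toLex (end, start)
lemma pvSorted2Eq (xs : List (Int × Int)) :
    PySem.List.sorted2 xs (fun x => x.2) (fun x => x.1) =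
    PySem.List.sorted xs (fun x => toLex (x.2, x.1)) := by
  rw [PySem.List.sorted_eq_foldl_insertBy]
  show xs.foldl (fun acc x => PySem.List.insertBy
      (fun a b => decide (a.2 < b.2) || !decide (b.2 < a.2) && decide (a.1 < b.1)) x acc) [] =
    xs.foldl (fun acc x => PySem.List.insertBy
      (fun a b => decide (toLex (a.2, a.1) < toLex (b.2, b.1))) x acc) []
  congr 1
  funext acc x
  congr 1
  funext a b
  by_cases h1 : a.2 < b.2
  · simp [h1, Prod.Lex.lt_iff]
  · by_cases h2 : b.2 < a.2
    · have hne : a.2 ≠ b.2 := by omega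
      simp [h1, h2, Prod.Lex.lt_iff, hne]
    · have he : a.2 = b.2 := by omega
      simp [Prod.Lex.lt_iff, he]

-- proof-local names for the pieces of the two ports, over an arbitrary (sorted) list cs
def pvLatest (cs : List (Int × Int)) : List Int :=
  (PySem.List.pyRange 0 (PySem.List.len cs) 1).map (fun i =>
    pvSearchA cs (PySem.List.pyGetD cs i (0, 0)).1 0 (i - 1) (-1))

def pvStepA (cs : List (Int × Int)) (dp : List Int) (i : Int) : List Int :=
  let exclude := PySem.List.pyGetD dp (i - 1) 0
  let li := PySem.List.pyGetD (pvLatest cs) (i - 1) 0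
  let include_ := if li ≠ -1 then PySem.List.pyGetD dp (li + 1) 0 else 1
  dp ++ [PySem.Int.mod (exclude + include_) MODULO]

def pvStepB (cs : List (Int × Int)) (f : List Int) (se : Int × Int) : List Int :=
  f ++ [PySem.Int.mod ((cs.zip f).foldl (fun c p => if p.1.2 ≤ se.1 then c + p.2 else c) 1) MODULO]

-- the first k iterations of each loop
def pvDpK (cs : List (Int × Int)) (k : Nat) : List Int :=
  (PySem.List.pyRange 1 ((k : Int) + 1) 1).foldl (pvStepA cs) [1]

def pvFK (cs : List (Int × Int)) (k : Nat) : List Int :=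
  (cs.take k).foldl (pvStepB cs) []

def pvF (cs : List (Int × Int)) : List Int := cs.foldl (pvStepB cs) []

-- c(i, s) = how many of the first i ends are ≤ s
def pvC (ends : List Int) (i : Nat) (s : Int) : Nat :=
  (ends.take i).countP (fun e => decide (e ≤ s))

-- the monotone hypothesis carried through the proofs: ends nondecreasing
def pvMono (cs : List (Int × Int)) : Prop :=
  ∀ p q : Nat, p ≤ q → q < cs.length → (cs.getD p (0, 0)).2 ≤ (cs.getD q (0, 0)).2

lemma pvZipTake {α β : Type} (l1 : List α) (l2 : List β) (n : Nat) :
    (l1.zip l2).take n = (l1.take n).zip (l2.take n) := by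
  induction l1 generalizing l2 n with
  | nil => simp
  | cons a t ih => cases l2 <;> cases n <;> simp [*]

lemma pvGetDMapRange (g : Nat → Int) (k j : Nat) (h : j < k) :
    ((List.range k).map g).getD j 0 = g j := by
  simp [List.getD_eq_getElem?_getD, h]

lemma pvMpos : (0 : Int) < MODULO := by unfold MODULO; norm_num

lemma pvModAdd (a b : Int) :
    PySem.Int.mod (PySem.Int.mod a MODULO + b) MODULO = PySem.Int.mod (a + b) MODULO := by
  rw [PySem.Int.mod_eq_emod_of_pos pvMpos, PySem.Int.mod_eq_emod_of_pos pvMpos,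
    PySem.Int.mod_eq_emod_of_pos pvMpos, Int.emod_add_emod]

lemma pvModSub (a : Int) :
    PySem.Int.mod (PySem.Int.mod (1 + a) MODULO - 1) MODULO = PySem.Int.mod a MODULO := by
  rw [PySem.Int.mod_eq_emod_of_pos pvMpos, PySem.Int.mod_eq_emod_of_pos pvMpos,
    PySem.Int.mod_eq_emod_of_pos pvMpos]
  have h1 : (1 : Int) % MODULO = 1 := by unfold MODULO; norm_num
  calc ((1 + a) % MODULO - 1) % MODULO
      = ((1 + a) % MODULO - 1 % MODULO) % MODULO := by rw [h1]
    _ = ((1 + a) - 1) % MODULO := (Int.sub_emod _ _ _).symm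
    _ = a % MODULO := by ring_nf

lemma pvC_le (ends : List Int) (i : Nat) (s : Int) : pvC ends i s ≤ i := by
  calc pvC ends i s ≤ (ends.take i).length := List.countP_le_length
    _ ≤ i := by simp [List.length_take]

lemma pvC_iff (ends : List Int)
    (hmono : ∀ p q : Nat, p ≤ q → q < ends.length → ends.getD p 0 ≤ ends.getD q 0)
    (i : Nat) (hi : i ≤ ends.length) (s : Int) (m : Nat) (hm : m < i) :
    ends.getD m 0 ≤ s ↔ m < pvC ends i s := by
  constructor
  · intro hle
    have hall : (ends.take (m + 1)).countP (fun e => decide (e ≤ s)) = m + 1 := by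
      rw [List.countP_eq_length.2, List.length_take, Nat.min_eq_left (by omega)]
      intro a ha
      rw [List.mem_iff_getElem] at ha
      obtain ⟨j, hj, rfl⟩ := ha
      have hjl : j < ends.length := by
        simp only [List.length_take] at hj; omega
      rw [List.getElem_take]
      simp only [decide_eq_true_eq]
      have hjm : j ≤ m := by simp only [List.length_take] at hj; omega
      calc ends[j] = ends.getD j 0 := (List.getD_eq_getElem ends 0 hjl).symm
        _ ≤ ends.getD m 0 := hmono j m hjm (by omega)
        _ ≤ s := hle
    have hpre : (ends.take (m + 1)).Sublist (ends.take i) := by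
      have ht : (ends.take i).take (m + 1) = ends.take (m + 1) := by
        rw [List.take_take]; congr 1; omega
      simpa [ht] using List.take_sublist (m + 1) (ends.take i)
    have hmono2 := hpre.countP_le (p := fun e => decide (e ≤ s))
    unfold pvC; omega
  · intro hc
    by_contra hne
    push_neg at hne
    have hsplit : pvC ends i s =
        (ends.take m).countP (fun e => decide (e ≤ s)) +
        ((ends.take i).drop m).countP (fun e => decide (e ≤ s)) := by
      unfold pvC
      conv_lhs => rw [← List.take_append_drop m (ends.take i)]
      rw [List.countP_append, List.take_take, Nat.min_eq_left (by omega)]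
    have h2 : ((ends.take i).drop m).countP (fun e => decide (e ≤ s)) = 0 := by
      rw [List.countP_eq_zero]
      intro a ha
      rw [List.mem_iff_getElem] at ha
      obtain ⟨j, hj, rfl⟩ := ha
      have hjt : m + j < (ends.take i).length := by
        simp only [List.length_drop] at hj; omega
      have hjl : m + j < ends.length := by
        simp only [List.length_take] at hjt; omega
      rw [List.getElem_drop, List.getElem_take]
      simp only [decide_eq_true_eq, not_le]
      calc s < ends.getD m 0 := hne
        _ ≤ ends.getD (m + j) 0 := hmono m (m + j) (by omega) hjl
        _ = ends[m + j] := List.getD_eq_getElem ends 0 hjl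
    have h3 : (ends.take m).countP (fun e => decide (e ≤ s)) ≤ m :=
      le_trans List.countP_le_length (by simp [List.length_take])
    omega

-- A's binary-search loop returns c - 1 whenever the predicate is a prefix predicate with cut c
lemma pvSearchA_eq (cs : List (Int × Int)) (s c : Int) :
    ∀ (fuel : Nat) (low high acc : Int), (high + 1 - low).toNat ≤ fuel →
    acc = low - 1 → low ≤ c → c ≤ high + 1 →
    (∀ m : Int, low ≤ m → m ≤ high → ((PySem.List.pyGetD cs m (0, 0)).2 ≤ s ↔ m < c)) →
    pvSearchA cs s low high acc = c - 1 := by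
  intro fuel
  induction fuel with
  | zero =>
    intro low high acc hf hacc hlc hch _
    rw [pvSearchA]
    have hnl : ¬ low ≤ high := by omega
    simp only [hnl, dite_false]
    omega
  | succ f ih =>
    intro low high acc hf hacc hlc hch hpred
    rw [pvSearchA]
    by_cases hlh : low ≤ high
    · simp only [hlh, dite_true]
      have hb := PySem.Int.floordiv_two_mid_bounds hlh
      by_cases hp : (PySem.List.pyGetD cs (PySem.Int.floordiv (low + high) 2) (0, 0)).2 ≤ s
      · simp only [hp, if_true]
        have hmc : PySem.Int.floordiv (low + high) 2 < c :=
          (hpred _ (by omega) (by omega)).1 hp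
        exact ih (PySem.Int.floordiv (low + high) 2 + 1) high
          (PySem.Int.floordiv (low + high) 2) (by omega) (by omega) (by omega) hch
          (fun m h1 h2 => hpred m (by omega) h2)
      · simp only [hp, if_false]
        have hcm : c ≤ PySem.Int.floordiv (low + high) 2 := by
          by_contra hcc
          exact hp ((hpred _ (by omega) (by omega)).2 (by omega))
        exact ih low (PySem.Int.floordiv (low + high) 2 - 1) acc (by omega) hacc hlc
          (by omega) (fun m h1 h2 => hpred m h1 (by omega))
    · simp only [hlh, dite_false]
      omega

-- sortedness gives the monotone-ends hypothesis
lemma pvMono_sorted (classes : List (Int × Int)) :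
    pvMono (PySem.List.sorted classes (fun x => toLex (x.2, x.1))) := by
  intro p q hpq hq
  have h := PySem.List.key_sorted_getElem_mono (xs := classes)
    (key := fun x => toLex (x.2, x.1)) hpq hq
  rw [List.getD_eq_getElem _ _ (by omega), List.getD_eq_getElem _ _ hq]
  rw [Prod.Lex.le_iff] at h
  simp only [ofLex_toLex] at h
  rcases h with h | ⟨h, _⟩
  · exact le_of_lt h
  · exact le_of_eq h

-- latest[k] = pvC - 1
lemma pvEndsGetD (cs : List (Int × Int)) (j : Nat) (h : j < cs.length) :
    (cs.map (fun x => x.2)).getD j 0 = (cs.getD j (0, 0)).2 := by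
  rw [List.getD_eq_getElem _ _ (by simpa using h), List.getD_eq_getElem _ _ h, List.getElem_map]

lemma pvEndsMono (cs : List (Int × Int)) (hm : pvMono cs) :
    ∀ p q : Nat, p ≤ q → q < (cs.map (fun x => x.2)).length →
      (cs.map (fun x => x.2)).getD p 0 ≤ (cs.map (fun x => x.2)).getD q 0 := by
  intro p q hpq hq
  rw [List.length_map] at hq
  rw [pvEndsGetD _ _ (by omega), pvEndsGetD _ _ hq]
  exact hm p q hpq hq

lemma pvLatest_eq (cs : List (Int × Int)) (hm : pvMono cs) (k : Nat) (hk : k < cs.length) :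
    PySem.List.pyGetD (pvLatest cs) (k : Int) 0 =
      (pvC (cs.map (fun x => x.2)) k (cs.getD k (0, 0)).1 : Int) - 1 := by
  unfold pvLatest
  have hlen : PySem.List.len cs = (cs.length : Int) := by simp
  rw [hlen, PySem.List.pyGetD_map_pyRange _ cs.length k 0 hk]
  have hget : PySem.List.pyGetD cs (k : Int) (0, 0) = cs.getD k (0, 0) := by simp
  rw [hget]
  apply pvSearchA_eq cs (cs.getD k (0, 0)).1 _ (k + 1) 0 ((k : Int) - 1) (-1)
  · omega
  · ring
  · exact Int.natCast_nonneg _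
  · have := pvC_le (cs.map (fun x => x.2)) k (cs.getD k (0, 0)).1
    omega
  · intro m hm0 hmk
    lift m to Nat using hm0 with j
    have hjk : j < k := by omega
    have hjget : PySem.List.pyGetD cs (j : Int) (0, 0) = cs.getD j (0, 0) := by simp
    rw [hjget]
    have hiff := pvC_iff (cs.map (fun x => x.2)) (pvEndsMono cs hm) k
      (by rw [List.length_map]; omega) (cs.getD k (0, 0)).1 j hjk
    rw [pvEndsGetD _ _ (by omega)] at hiff
    constructor
    · intro h
      have := hiff.1 h
      omega
    · intro h
      exact hiff.2 (by omega)

-- the inner zip loop of B is 1 + sum of the first c entries of f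
lemma pvInner (cs : List (Int × Int)) (f : List Int) (s : Int) (c : Nat)
    (hf : f.length ≤ cs.length) (hc : c ≤ f.length)
    (hpred : ∀ j : Nat, j < f.length → ((cs.getD j (0, 0)).2 ≤ s ↔ j < c)) :
    (cs.zip f).foldl (fun acc p => if p.1.2 ≤ s then acc + p.2 else acc) 1 =
      1 + (f.take c).sum := by
  have hzl : (cs.zip f).length = f.length := by simp [List.length_zip]; omega
  have hsplit : cs.zip f = (cs.zip f).take c ++ (cs.zip f).drop c :=
    (List.take_append_drop _ _).symm
  rw [hsplit, List.foldl_append]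
  have h1 : ((cs.zip f).take c).foldl (fun acc p => if p.1.2 ≤ s then acc + p.2 else acc) 1
      = 1 + (f.take c).sum := by
    rw [PySem.List.foldl_congr_mem (g := fun acc (p : (Int × Int) × Int) => acc + p.2)]
    · rw [PySem.List.foldl_add]
      rw [pvZipTake, List.map_snd_zip (by simp [List.length_take]; omega)]
    · intro acc x hx
      rw [List.mem_iff_getElem] at hx
      obtain ⟨j, hj, rfl⟩ := hx
      have hjc : j < c := by simp only [List.length_take, hzl, lt_min_iff] at hj; omega
      have hjf : j < f.length := by omega
      rw [List.getElem_take, List.getElem_zip]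
      have hp := (hpred j hjf).2 hjc
      rw [List.getD_eq_getElem _ _ (by omega)] at hp
      simp [hp]
  rw [h1]
  rw [PySem.List.foldl_congr_mem (g := fun acc (_ : (Int × Int) × Int) => acc)]
  · exact PySem.List.foldl_ignore _ _
  · intro acc x hx
    rw [List.mem_iff_getElem] at hx
    obtain ⟨j, hj, rfl⟩ := hx
    have hjf : c + j < f.length := by simp only [List.length_drop, hzl] at hj; omega
    rw [List.getElem_drop, List.getElem_zip]
    have hp : ¬ ((cs.getD (c + j) (0, 0)).2 ≤ s) := by
      intro hle
      have := (hpred (c + j) hjf).1 hle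
      omega
    rw [List.getD_eq_getElem _ _ (by omega)] at hp
    simp [hp]

lemma pvFK_succ_raw (cs : List (Int × Int)) (k : Nat) (hk : k < cs.length) :
    pvFK cs (k + 1) = pvStepB cs (pvFK cs k) cs[k] := by
  unfold pvFK
  have ht : cs.take (k + 1) = cs.take k ++ [cs[k]] := by
    rw [List.take_add_one]
    simp [List.getElem?_eq_getElem hk]
  rw [ht, List.foldl_append]
  rfl

lemma pvFK_length (cs : List (Int × Int)) (k : Nat) (hk : k ≤ cs.length) :
    (pvFK cs k).length = k := by
  induction k with
  | zero => simp [pvFK]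
  | succ m ih =>
    rw [pvFK_succ_raw cs m (by omega), pvStepB]
    simp [ih (by omega)]

lemma pvFK_prefix (cs : List (Int × Int)) (k m : Nat) (hkm : k ≤ m) (hm : m ≤ cs.length) :
    pvFK cs k = (pvFK cs m).take k := by
  induction m with
  | zero => have : k = 0 := by omega
            subst this; simp [pvFK]
  | succ j ih =>
    rcases Nat.eq_or_lt_of_le hkm with rfl | hlt
    · rw [List.take_of_length_le (le_of_eq (pvFK_length _ _ hm))]
    · rw [pvFK_succ_raw cs j (by omega), pvStepB,
        List.take_append_of_le_length (by rw [pvFK_length cs j (by omega)]; omega)]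
      exact ih (by omega) (by omega)

lemma pvFK_succ (cs : List (Int × Int)) (hm : pvMono cs) (k : Nat) (hk : k < cs.length) :
    pvFK cs (k + 1) = pvFK cs k ++
      [PySem.Int.mod (1 + ((pvFK cs k).take (pvC (cs.map (fun x => x.2)) k (cs.getD k (0, 0)).1)).sum) MODULO] := by
  rw [pvFK_succ_raw cs k hk, pvStepB]
  have hflen : (pvFK cs k).length = k := pvFK_length cs k (by omega)
  have hse : (cs[k]).1 = (cs.getD k (0, 0)).1 := by rw [List.getD_eq_getElem _ _ hk]
  have hc := pvC_le (cs.map (fun x => x.2)) k (cs.getD k (0, 0)).1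
  have hinner := pvInner cs (pvFK cs k) (cs.getD k (0, 0)).1
    (pvC (cs.map (fun x => x.2)) k (cs.getD k (0, 0)).1)
    (by omega) (by omega) ?_
  · rw [hse, hinner]
  · intro j hj
    rw [hflen] at hj
    have hiff := pvC_iff (cs.map (fun x => x.2)) (pvEndsMono cs hm) k
      (by rw [List.length_map]; omega) (cs.getD k (0, 0)).1 j hj
    rw [pvEndsGetD _ _ (by omega)] at hiff
    exact hiff

-- dp after k iterations is the table of mod'ed prefix sums of f
lemma pvF_eq_FK (cs : List (Int × Int)) : pvF cs = pvFK cs cs.length := by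
  unfold pvF pvFK
  rw [List.take_length]

lemma pvF_take (cs : List (Int × Int)) (j : Nat) (hj : j ≤ cs.length) :
    (pvF cs).take j = pvFK cs j := by
  rw [pvF_eq_FK]
  exact (pvFK_prefix cs j cs.length hj le_rfl).symm

lemma pvModOne : PySem.Int.mod 1 MODULO = 1 := by
  rw [PySem.Int.mod_eq_emod_of_pos pvMpos]
  unfold MODULO
  norm_num

lemma pvDpK_eq (cs : List (Int × Int)) (hm : pvMono cs) (k : Nat) (hk : k ≤ cs.length) :
    pvDpK cs k = (List.range (k + 1)).map
      (fun j => PySem.Int.mod (1 + ((pvF cs).take j).sum) MODULO) := by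
  induction k with
  | zero =>
    unfold pvDpK
    rw [show (((0 : Nat) : Int) + 1) = 1 by norm_num, PySem.List.pyRange_one_eq_nil le_rfl]
    simp [pvModOne]
  | succ m ih =>
    have hmlt : m < cs.length := by omega
    have hrange : PySem.List.pyRange 1 (((m + 1 : Nat) : Int) + 1) 1 =
        PySem.List.pyRange 1 ((m : Int) + 1) 1 ++ [(m : Int) + 1] := by
      push_cast
      exact PySem.List.pyRange_one_succ_right (by omega)
    unfold pvDpK
    rw [hrange, List.foldl_append]
    have hfold : (PySem.List.pyRange 1 ((m : Int) + 1) 1).foldl (pvStepA cs) [1] = pvDpK cs m := rfl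
    rw [hfold, ih (by omega), List.foldl_cons, List.foldl_nil, pvStepA]
    have hi1 : ((m : Int) + 1 - 1) = (m : Int) := by ring
    rw [hi1]
    have hexcl : PySem.List.pyGetD ((List.range (m + 1)).map
        (fun j => PySem.Int.mod (1 + ((pvF cs).take j).sum) MODULO)) (m : Int) 0 =
        PySem.Int.mod (1 + ((pvF cs).take m).sum) MODULO := by
      rw [PySem.List.pyGetD_natCast, pvGetDMapRange _ _ _ (Nat.lt_succ_self m)]
    have hli := pvLatest_eq cs hm m hmlt
    rw [hexcl, hli]
    have hcle := pvC_le (cs.map (fun x => x.2)) m (cs.getD m (0, 0)).1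
    have hsucc := pvFK_succ cs hm m hmlt
    have htake1 : (pvFK cs m).take (pvC (cs.map (fun x => x.2)) m (cs.getD m (0, 0)).1) =
        (pvF cs).take (pvC (cs.map (fun x => x.2)) m (cs.getD m (0, 0)).1) := by
      rw [pvF_take cs _ (by omega)]
      exact (pvFK_prefix cs _ m (by omega) (by omega)).symm
    have hsum : ((pvF cs).take (m + 1)).sum = ((pvF cs).take m).sum +
        PySem.Int.mod (1 + ((pvF cs).take (pvC (cs.map (fun x => x.2)) m (cs.getD m (0, 0)).1)).sum) MODULO := by
      rw [pvF_take cs (m + 1) (by omega), hsucc, htake1, List.sum_append,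
        pvF_take cs m (by omega)]
      simp
    have hincl : (if ((pvC (cs.map (fun x => x.2)) m (cs.getD m (0, 0)).1 : Int) - 1) ≠ -1 then
        PySem.List.pyGetD ((List.range (m + 1)).map
          (fun j => PySem.Int.mod (1 + ((pvF cs).take j).sum) MODULO))
          (((pvC (cs.map (fun x => x.2)) m (cs.getD m (0, 0)).1 : Int) - 1) + 1) 0 else 1) =
        PySem.Int.mod (1 + ((pvF cs).take (pvC (cs.map (fun x => x.2)) m (cs.getD m (0, 0)).1)).sum) MODULO := by
      by_cases hc0 : pvC (cs.map (fun x => x.2)) m (cs.getD m (0, 0)).1 = 0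
      · rw [if_neg (by rw [hc0]; norm_num)]
        rw [hc0]
        simp [pvModOne]
      · rw [if_pos (by omega)]
        have hcast : ((pvC (cs.map (fun x => x.2)) m (cs.getD m (0, 0)).1 : Int) - 1) + 1 =
            (pvC (cs.map (fun x => x.2)) m (cs.getD m (0, 0)).1 : Int) := by ring
        rw [hcast, PySem.List.pyGetD_natCast, pvGetDMapRange _ _ _ (by omega)]
    rw [hincl]
    have hsplit2 : List.map (fun j => PySem.Int.mod (1 + ((pvF cs).take j).sum) MODULO)
        (List.range (m + 1 + 1)) =
        List.map (fun j => PySem.Int.mod (1 + ((pvF cs).take j).sum) MODULO) (List.range (m + 1)) ++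
          [PySem.Int.mod (1 + ((pvF cs).take (m + 1)).sum) MODULO] := by
      rw [List.range_succ, List.map_append, List.map_cons, List.map_nil]
    rw [hsplit2]
    congr 1
    rw [hsum, pvModAdd]
    congr 2
    ring

lemma pvMain (cs : List (Int × Int)) (hm : pvMono cs) :
    PySem.Int.mod (PySem.List.pyGetD (pvDpK cs cs.length) ((cs.length : Int)) 0 - 1) MODULO =
      PySem.Int.mod ((pvF cs).foldl (· + ·) 0) MODULO := by
  rw [pvDpK_eq cs hm cs.length le_rfl, PySem.List.pyGetD_natCast,
    pvGetDMapRange _ _ _ (Nat.lt_succ_self _)]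
  have hlen : (pvF cs).length = cs.length := by
    rw [pvF_eq_FK]
    exact pvFK_length _ _ le_rfl
  rw [List.take_of_length_le (le_of_eq hlen), pvModSub]
  congr 1
  have h2 : (pvF cs).foldl (· + ·) 0 = 0 + ((pvF cs).map (fun x => x)).sum :=
    PySem.List.foldl_add _ _ _
  rw [h2]
  simp

-- ===== VERDICT (by name: the statement is the Claim_ definition above) =====
theorem count_non_overlapping_subsets_spec : Claim_equal_count_non_overlapping_subsets := by
  intro classes _
  unfold Spec_count_non_overlapping_subsets
  show PySem.Int.mod (PySem.List.pyGetD
      (pvDpK (PySem.List.sorted2 classes (fun x => x.2) (fun x => x.1))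
        (PySem.List.sorted2 classes (fun x => x.2) (fun x => x.1)).length)
      (((PySem.List.sorted2 classes (fun x => x.2) (fun x => x.1)).length : Int)) 0 - 1) MODULO =
    PySem.Int.mod ((pvF (PySem.List.sorted2 classes (fun x => x.2) (fun x => x.1))).foldl (· + ·) 0) MODULO
  rw [pvSorted2Eq]
  exact pvMain _ (pvMono_sorted classes)
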